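-- pv_equiv track=rewrite | github.com/arahant/qc-qosf-22-1 | main.py | get_resulting_qubit
-- ===== SOURCE A (Python) =====
-- def get_resulting_qubit(qubit, empty, state):
--     res = ''
--     bot = empty - state
--     for i, q in enumerate(qubit):
--         if i+1 in state:
--             res += '1'
--         elif i+1 in bot:
--             res += '0'
--         else:
--             res += '.'
--     return res
-- ===== SOURCE B (Python) =====
-- def get_resulting_qubit(qubit, empty, state):
--     n = len(qubit)
--     res = ['.'] * n
--     for p in state:
--         if 1 <= p <= n:
--             res[p - 1] = '1'
--     for p in empty - state:
--         if 1 <= p <= n: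
--             res[p - 1] = '0'
--     return ''.join(res)
-- ===== Notes on version B (the rewrite author's own statement) =====
-- stated objective: alternative
-- what changed: B scatters into a preallocated ['.']*n buffer by iterating the state and empty-state sets (writing '1'/'0' at in-range positions), instead of A's per-position gather that tests set membership for every qubit index.
import Mathlib
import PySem

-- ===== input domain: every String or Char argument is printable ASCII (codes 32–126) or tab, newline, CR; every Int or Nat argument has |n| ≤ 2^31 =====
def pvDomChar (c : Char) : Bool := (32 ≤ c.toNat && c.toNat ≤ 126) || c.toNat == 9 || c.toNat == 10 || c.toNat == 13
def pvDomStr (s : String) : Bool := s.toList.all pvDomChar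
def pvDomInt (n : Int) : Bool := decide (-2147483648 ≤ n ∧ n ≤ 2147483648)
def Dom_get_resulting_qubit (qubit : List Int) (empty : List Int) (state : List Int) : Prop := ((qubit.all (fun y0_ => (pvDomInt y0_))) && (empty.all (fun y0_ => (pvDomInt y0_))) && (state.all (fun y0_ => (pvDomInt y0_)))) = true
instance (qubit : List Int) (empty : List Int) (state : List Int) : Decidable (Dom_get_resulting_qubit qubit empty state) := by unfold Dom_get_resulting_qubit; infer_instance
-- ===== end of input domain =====

-- B scatters '1'/'0' into a preallocated '.'-buffer by iterating the two sets; same result, alternative decomposition.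

-- ===== PORT A =====
def get_resulting_qubit (qubit : List Int) (empty : List Int) (state : List Int) : String :=
  let bot := PySem.Set.diff empty state
  String.ofList ((PySem.List.enumerate qubit 0).foldl (fun res iq =>
    if PySem.Set.contains state (iq.1 + 1) then res ++ ['1']
    else if PySem.Set.contains bot (iq.1 + 1) then res ++ ['0']
    else res ++ ['.']) [])

-- ===== PORT B =====
def get_resulting_qubit_alt (qubit : List Int) (empty : List Int) (state : List Int) : String :=
  let n := qubit.length
  let res0 := List.replicate n '.'
  let res1 := state.foldl (fun r p => if 1 ≤ p ∧ p ≤ (n : Int) then PySem.List.pySetD r (p - 1) '1' else r) res0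
  let res2 := (PySem.Set.diff empty state).foldl (fun r p => if 1 ≤ p ∧ p ≤ (n : Int) then PySem.List.pySetD r (p - 1) '0' else r) res1
  String.ofList res2

-- ===== PRECONDITION & SPEC =====
def Spec_get_resulting_qubit (qubit : List Int) (empty : List Int) (state : List Int) (out : String) : Prop := out = get_resulting_qubit_alt qubit empty state
instance (qubit : List Int) (empty : List Int) (state : List Int) (out : String) : Decidable (Spec_get_resulting_qubit qubit empty state out) := by unfold Spec_get_resulting_qubit; infer_instance

-- ===== CLAIM (what is proved, stated in full; the proofs are below) =====
def Claim_equal_get_resulting_qubit : Prop := ∀ (qubit : List Int) (empty : List Int) (state : List Int), Dom_get_resulting_qubit qubit empty state → Spec_get_resulting_qubit qubit empty state (get_resulting_qubit qubit empty state)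

-- ===== LEMMAS AND PROOFS =====

-- the scatter fold preserves the buffer length
lemma scatter_length (xs : List Int) (c : Char) (n : Int) (r0 : List Char) :
    (xs.foldl (fun r p => if 1 ≤ p ∧ p ≤ n then PySem.List.pySetD r (p - 1) c else r) r0).length = r0.length := by
  induction xs generalizing r0 with
  | nil => rfl
  | cons p xs ih =>
    simp only [List.foldl_cons]
    split_ifs with h
    · rw [ih]; simp [pysem]
    · exact ih r0

-- element i of the scatter fold: c if i+1 occurs in xs, otherwise the original entry
lemma scatter_getElem? (xs : List Int) (c : Char) (n : Nat) (i : Nat) (hi : i < n) :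
    ∀ r0 : List Char, r0.length = n →
    (xs.foldl (fun r p => if 1 ≤ p ∧ p ≤ (n : Int) then PySem.List.pySetD r (p - 1) c else r) r0)[i]? =
    if ((i : Int) + 1) ∈ xs then some c else r0[i]? := by
  induction xs with
  | nil => intro r0 _; simp
  | cons p xs ih =>
    intro r0 hlen
    simp only [List.foldl_cons]
    by_cases hg : 1 ≤ p ∧ p ≤ (n : Int)
    · rw [if_pos hg]
      have hlen' : (PySem.List.pySetD r0 (p - 1) c).length = n := by
        simpa [pysem] using hlen
      rw [ih _ hlen']
      rw [PySem.List.pySetD_of_nonneg r0 c (show (0:Int) ≤ p - 1 by omega)]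
      by_cases hpi : p = (i : Int) + 1
      · have hidx : (p - 1).toNat = i := by omega
        have : (r0.set (p - 1).toNat c)[i]? = some c := by
          rw [hidx]; simp [hlen, hi]
        rw [this]
        simp [hpi]
      · have hidx : (p - 1).toNat ≠ i := by omega
        have : (r0.set (p - 1).toNat c)[i]? = r0[i]? := by
          simp [List.getElem?_set]
          intro h
          exact absurd h (by omega)
        rw [this]
        have : ((i : Int) + 1 ∈ p :: xs) ↔ ((i : Int) + 1 ∈ xs) := by
          simp [List.mem_cons]; intro h; exact absurd h.symm hpi
        simp only [List.mem_cons]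
        have hne : ¬ ((i : Int) + 1 = p) := fun h => hpi h.symm
        simp [hne]
    · rw [if_neg hg, ih r0 hlen]
      have hne : ¬ ((i : Int) + 1 = p) := by omega
      simp [List.mem_cons, hne]

-- ===== VERDICT (by name: the statement is the Claim_ definition above) =====
theorem get_resulting_qubit_spec : Claim_equal_get_resulting_qubit := by
  intro qubit empty state _
  unfold Spec_get_resulting_qubit get_resulting_qubit get_resulting_qubit_alt
  simp only []
  apply congrArg String.ofList
  -- rewrite A's fold as a map
  have hA : (PySem.List.enumerate qubit 0).foldl (fun res iq =>
      if PySem.Set.contains state (iq.1 + 1) then res ++ ['1']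
      else if PySem.Set.contains (PySem.Set.diff empty state) (iq.1 + 1) then res ++ ['0']
      else res ++ ['.']) [] =
      (PySem.List.enumerate qubit 0).map (fun iq =>
        if PySem.Set.contains state (iq.1 + 1) then '1'
        else if PySem.Set.contains (PySem.Set.diff empty state) (iq.1 + 1) then '0'
        else '.') := by
    rw [show (fun (res : List Char) (iq : Int × Int) =>
        if PySem.Set.contains state (iq.1 + 1) then res ++ ['1']
        else if PySem.Set.contains (PySem.Set.diff empty state) (iq.1 + 1) then res ++ ['0']
        else res ++ ['.']) =
        (fun res iq => res ++ [if PySem.Set.contains state (iq.1 + 1) then '1'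
          else if PySem.Set.contains (PySem.Set.diff empty state) (iq.1 + 1) then '0'
          else '.']) from funext fun r => funext fun iq => by split_ifs <;> rfl]
    simpa using PySem.List.foldl_append_singleton_eq_map (l := PySem.List.enumerate qubit 0)
      (acc := []) (f := fun iq =>
        if PySem.Set.contains state (iq.1 + 1) then '1'
        else if PySem.Set.contains (PySem.Set.diff empty state) (iq.1 + 1) then '0'
        else '.')
  rw [hA]
  set n := qubit.length with hn
  have hlen1 : ((state.foldl (fun r p => if 1 ≤ p ∧ p ≤ (n : Int) then PySem.List.pySetD r (p - 1) '1' else r) (List.replicate n '.'))).length = n := by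
    rw [scatter_length]; simp
  apply List.ext_getElem?
  intro k
  by_cases hk : k < n
  · -- A side
    have hAe : ((PySem.List.enumerate qubit 0).map (fun iq =>
        if PySem.Set.contains state (iq.1 + 1) then '1'
        else if PySem.Set.contains (PySem.Set.diff empty state) (iq.1 + 1) then '0'
        else '.'))[k]? = some (if PySem.Set.contains state ((k : Int) + 1) then '1'
          else if PySem.Set.contains (PySem.Set.diff empty state) ((k : Int) + 1) then '0'
          else '.') := by
      rw [List.getElem?_map, PySem.List.getElem?_enumerate]
      have : qubit[k]? = some qubit[k] := List.getElem?_eq_getElem hk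
      rw [this]
      simp
    rw [hAe]
    rw [scatter_getElem? _ _ n k hk _ hlen1,
        scatter_getElem? _ _ n k hk _ (by simp)]
    have hrep : (List.replicate n '.')[k]? = some '.' := by
      simp [hk]
    by_cases hs : ((k : Int) + 1) ∈ state
    · have hnb : ¬ ((k : Int) + 1) ∈ PySem.Set.diff empty state := by
        rw [PySem.Set.mem_diff]; exact fun h => h.2 hs
      simp [hs, hnb]
    · by_cases hb : ((k : Int) + 1) ∈ PySem.Set.diff empty state
      · have h1 : PySem.Set.contains state ((k : Int) + 1) = false := by
          simp [PySem.Set.contains_eq_listContains, hs]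
        simp [hb, hs, h1]
      · have h1 : PySem.Set.contains state ((k : Int) + 1) = false := by
          simp [PySem.Set.contains_eq_listContains, hs]
        have h2 : PySem.Set.contains (PySem.Set.diff empty state) ((k : Int) + 1) = false := by
          simp only [PySem.Set.contains_eq_listContains]
          simpa using hb
        simp [hb, hs, hk]
  · -- both out of range
    rw [List.getElem?_eq_none (by simp [PySem.List.length_enumerate, ← hn]; omega),
        List.getElem?_eq_none (by rw [scatter_length, hlen1]; omega)]
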